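-- pv_equiv track=rewrite | github.com/lyric0126/recommend_task_moe_lora | MoCLE-main/recommendation/movielens1m/plot_train_metrics.py | deduplicate_by_step
-- ===== SOURCE A (Python) =====
-- def deduplicate_by_step(rows):
--     step_to_row = {}
--     for row in rows:
--         if "step" not in row:
--             continue
--         try:
--             step = int(row["step"])
--         except Exception:
--             continue
--         step_to_row[step] = row
--     dedup_rows = [step_to_row[k] for k in sorted(step_to_row.keys())]
--     return dedup_rows
-- ===== SOURCE B (Python) =====
-- def deduplicate_by_step(rows):
--     acc = []  # (step, row) pairs kept sorted ascending by step, unique steps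
--     for row in rows:
--         if "step" not in row:
--             continue
--         try:
--             step = int(row["step"])
--         except Exception:
--             continue
--         i = 0
--         while i < len(acc) and acc[i][0] < step:
--             i += 1
--         if i < len(acc) and acc[i][0] == step:
--             acc[i] = (step, row)
--         else:
--             acc.insert(i, (step, row))
--     return [row for _, row in acc]
-- ===== Notes on version B (the rewrite author's own statement) =====
-- stated objective: alternative
-- what changed: Replaces the dict keyed by step plus a final sort of the keys with a single ordered association list maintained by sorted insertion (replace on equal step), so the output is already in ascending step order with last-row-wins.
import Mathlib
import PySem

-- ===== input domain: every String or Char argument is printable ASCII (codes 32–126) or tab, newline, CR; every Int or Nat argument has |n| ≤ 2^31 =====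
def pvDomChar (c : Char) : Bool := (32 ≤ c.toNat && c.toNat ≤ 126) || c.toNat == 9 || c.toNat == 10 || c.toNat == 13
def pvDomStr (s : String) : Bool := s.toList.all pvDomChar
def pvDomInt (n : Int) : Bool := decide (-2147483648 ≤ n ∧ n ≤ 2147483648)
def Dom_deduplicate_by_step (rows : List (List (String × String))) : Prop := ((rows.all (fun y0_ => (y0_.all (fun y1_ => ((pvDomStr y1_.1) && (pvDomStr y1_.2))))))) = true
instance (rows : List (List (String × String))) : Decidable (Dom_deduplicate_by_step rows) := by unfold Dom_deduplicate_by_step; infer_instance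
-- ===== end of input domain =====

-- B replaces A's dict-then-sort-keys with a single ordered association list maintained
-- by sorted insertion (replace on equal step); same return value, alternative algorithm.

-- shared guard of both Pythons: row["step"] parsed as int, None when the key is
-- missing or int() raises ValueError
def pvParse? (row : List (String × String)) : Option Int :=
  match (PySem.Dict.mk row).get? "step" with
  | none => none
  | some s => PySem.Int.ofStr? s

-- ===== PORT A =====
def deduplicate_by_step (rows : List (List (String × String))) : List (List (String × String)) :=
  let d := rows.foldl
    (fun d row =>
      match pvParse? row with
      | none => d
      | some step => d.insert step row)
    (PySem.Dict.empty)
  -- step_to_row[k] for k in sorted(keys): k is always present, so getD's default is never used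
  (PySem.List.sorted d.keys (fun k => k) false).map (fun k => d.getD k [])

-- ===== PORT B =====
-- the linear scan 'while i < len(acc) and acc[i][0] < step' + replace/insert at i
def pvInsSorted (k : Int) (v : List (String × String)) :
    List (Int × List (String × String)) → List (Int × List (String × String))
  | [] => [(k, v)]
  | (k', v') :: t =>
    if k' < k then (k', v') :: pvInsSorted k v t
    else if k' = k then (k, v) :: t
    else (k, v) :: (k', v') :: t

def deduplicate_by_step_alt (rows : List (List (String × String))) : List (List (String × String)) :=
  (rows.foldl
    (fun acc row =>
      match pvParse? row with
      | none => acc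
      | some step => pvInsSorted step row acc)
    []).map (fun p => p.2)

-- ===== PRECONDITION & SPEC =====
def Spec_deduplicate_by_step (rows : List (List (String × String))) (out : List (List (String × String))) : Prop := out = deduplicate_by_step_alt rows
instance (rows : List (List (String × String))) (out : List (List (String × String))) : Decidable (Spec_deduplicate_by_step rows out) := by unfold Spec_deduplicate_by_step; infer_instance

-- ===== CLAIM (what is proved, stated in full; the proofs are below) =====
def Claim_equal_deduplicate_by_step : Prop := ∀ (rows : List (List (String × String))), Dom_deduplicate_by_step rows → Spec_deduplicate_by_step rows (deduplicate_by_step rows)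

-- ===== LEMMAS AND PROOFS =====

-- a list with no entry keyed k is unchanged by the "drop key k" filter
theorem pv_filter_eq_self {V : Type} (l : List (Int × V)) (k : Int)
    (h : ∀ p ∈ l, p.1 ≠ k) : l.filter (fun p => !(p.1 == k)) = l := by
  apply List.filter_eq_self.mpr
  intro p hp
  simp [h p hp]

theorem pv_filter_cons_ne {V : Type} (t : List (Int × V)) (k k0 : Int) (v0 : V)
    (h : k0 ≠ k) :
    List.filter (fun p => !(p.1 == k)) ((k0, v0) :: t)
      = (k0, v0) :: List.filter (fun p => !(p.1 == k)) t := by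
  simp [h]

theorem pv_map_repl_eq_self {V : Type} (l : List (Int × V)) (k : Int) (v : V)
    (h : ∀ p ∈ l, p.1 ≠ k) :
    l.map (fun p => if p.1 == k then (k, v) else p) = l := by
  calc l.map (fun p => if p.1 == k then (k, v) else p)
      = l.map id := List.map_congr_left (fun p hp => by simp [h p hp])
    _ = l := List.map_id l

theorem pv_aux_map_perm {V : Type} (k : Int) (v : V) :
    ∀ (l : List (Int × V)), (l.map Prod.fst).Nodup →
      (l.find? (fun p => p.1 == k)).isSome →
      (l.map (fun p => if p.1 == k then (k, v) else p)).Perm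
        ((k, v) :: l.filter (fun p => !(p.1 == k)))
  | [], _, hf => by simp at hf
  | (k0, v0) :: t, hnd, hf => by
    simp only [List.map_cons, List.nodup_cons] at hnd
    by_cases hk : k0 = k
    · subst hk
      have ht : ∀ p ∈ t, p.1 ≠ k0 := by
        intro p hp hpk
        exact hnd.1 (hpk ▸ List.mem_map_of_mem hp)
      simp only [List.map_cons, List.filter_cons]
      rw [pv_map_repl_eq_self t k0 v ht, pv_filter_eq_self t k0 ht]
      simp
    · have hb0 : ((k0 : Int) == k) = false := by simp [hk]
      have hf' : (t.find? (fun p => p.1 == k)).isSome := by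
        simp only [List.find?_cons, hb0] at hf
        exact hf
      have ih := pv_aux_map_perm k v t hnd.2 hf'
      have hx : (if (((k0, v0) : Int × V).1 == k) = true then (k, v) else (k0, v0))
          = ((k0, v0) : Int × V) := by simp [hk]
      rw [List.map_cons, pv_filter_cons_ne t k k0 v0 hk, hx]
      exact ((ih.cons (k0, v0)).trans (List.Perm.swap _ _ _))

theorem pv_insert_items_perm {V : Type} (d : PySem.Dict Int V) (hnd : d.keys.Nodup)
    (k : Int) (v : V) :
    (d.insert k v).items.Perm ((k, v) :: d.items.filter (fun p => !(p.1 == k))) := by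
  by_cases hc : d.contains k = true
  · show (if d.contains k = true then _ else _ : PySem.Dict Int V).items.Perm _
    rw [if_pos hc]
    have hf : (d.items.find? (fun p => p.1 == k)).isSome := by
      rw [PySem.Dict.contains_eq_isSome_get?] at hc
      simpa [PySem.Dict.get?] using hc
    exact pv_aux_map_perm k v d.items (by simpa [PySem.Dict.keys] using hnd) hf
  · show (if d.contains k = true then _ else _ : PySem.Dict Int V).items.Perm _
    rw [if_neg hc]
    have hno : ∀ p ∈ d.items, p.1 ≠ k := by
      intro p hp hpk
      apply hc
      rw [PySem.Dict.contains_eq_isSome_get?]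
      simp only [PySem.Dict.get?]
      have hne : d.items.find? (fun q => q.1 == k) ≠ none := by
        intro hn
        have := List.find?_eq_none.mp hn p hp
        simp [hpk] at this
      rcases Option.ne_none_iff_exists'.mp hne with ⟨q, hq⟩
      simp [hq]
    rw [pv_filter_eq_self d.items k hno]
    exact List.perm_append_singleton _ _

theorem pv_ins_perm (k : Int) (v : List (String × String)) :
    ∀ (acc : List (Int × List (String × String))),
      acc.Pairwise (fun a b => a.1 < b.1) →
      (pvInsSorted k v acc).Perm ((k, v) :: acc.filter (fun p => !(p.1 == k)))
  | [], _ => by simp [pvInsSorted]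
  | (k', v') :: t, hpw => by
    rw [List.pairwise_cons] at hpw
    by_cases h1 : k' < k
    · have hb : k' ≠ k := fun h => lt_irrefl k (h ▸ h1)
      have ih := pv_ins_perm k v t hpw.2
      simp only [pvInsSorted, if_pos h1]
      rw [pv_filter_cons_ne t k k' v' hb]
      exact ((ih.cons (k', v')).trans (List.Perm.swap _ _ _))
    · by_cases h2 : k' = k
      · subst h2
        have ht : ∀ p ∈ t, p.1 ≠ k' := by
          intro p hp h
          exact absurd (hpw.1 p hp) (by simp [h])
        simp only [pvInsSorted, if_neg h1, List.filter_cons]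
        rw [pv_filter_eq_self t k' ht]
        simp
      · have ht : ∀ p ∈ ((k', v') :: t), p.1 ≠ k := by
          intro p hp
          rcases List.mem_cons.mp hp with h | h
          · subst h; exact h2
          · intro hk
            exact h1 (hk ▸ hpw.1 p h)
        simp only [pvInsSorted, if_neg h1, if_neg h2]
        rw [pv_filter_eq_self _ k ht]

theorem pv_ins_pairwise (k : Int) (v : List (String × String)) :
    ∀ (acc : List (Int × List (String × String))),
      acc.Pairwise (fun a b => a.1 < b.1) →
      (pvInsSorted k v acc).Pairwise (fun a b => a.1 < b.1)
  | [], _ => by simp [pvInsSorted]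
  | (k', v') :: t, hpw => by
    rw [List.pairwise_cons] at hpw
    by_cases h1 : k' < k
    · simp only [pvInsSorted, if_pos h1]
      rw [List.pairwise_cons]
      refine ⟨?_, pv_ins_pairwise k v t hpw.2⟩
      intro p hp
      have hmem := (pv_ins_perm k v t hpw.2).mem_iff.mp hp
      rcases List.mem_cons.mp hmem with h | h
      · subst h; exact h1
      · exact hpw.1 p (List.mem_of_mem_filter h)
    · by_cases h2 : k' = k
      · subst h2
        simp only [pvInsSorted, if_neg h1]
        exact List.pairwise_cons.mpr ⟨hpw.1, hpw.2⟩
      · have hlt : k < k' := lt_of_le_of_ne (not_lt.mp h1) (fun h => h2 h.symm)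
        simp only [pvInsSorted, if_neg h1, if_neg h2]
        rw [List.pairwise_cons]
        refine ⟨?_, List.pairwise_cons.mpr ⟨hpw.1, hpw.2⟩⟩
        intro p hp
        rcases List.mem_cons.mp hp with h | h
        · subst h; exact hlt
        · exact lt_trans hlt (hpw.1 p h)

-- the loop invariant: d's keys are distinct, acc is sorted strictly by key,
-- and acc is a rearrangement of d's items
def pvInv (d : PySem.Dict Int (List (String × String)))
    (acc : List (Int × List (String × String))) : Prop :=
  d.keys.Nodup ∧ acc.Pairwise (fun a b => a.1 < b.1) ∧ acc.Perm d.items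

theorem pv_step_inv (d : PySem.Dict Int (List (String × String)))
    (acc : List (Int × List (String × String))) (k : Int)
    (v : List (String × String)) (h : pvInv d acc) :
    pvInv (d.insert k v) (pvInsSorted k v acc) := by
  obtain ⟨hnd, hpw, hperm⟩ := h
  refine ⟨PySem.Dict.nodup_keys_insert _ _ _ hnd, pv_ins_pairwise k v acc hpw, ?_⟩
  exact ((pv_ins_perm k v acc hpw).trans
    (((hperm.filter _).cons (k, v)).trans (pv_insert_items_perm d hnd k v).symm))

theorem pv_fold_inv :
    ∀ (rows : List (List (String × String)))
      (d : PySem.Dict Int (List (String × String)))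
      (acc : List (Int × List (String × String))), pvInv d acc →
      pvInv
        (rows.foldl (fun d row =>
          match pvParse? row with
          | none => d
          | some step => d.insert step row) d)
        (rows.foldl (fun acc row =>
          match pvParse? row with
          | none => acc
          | some step => pvInsSorted step row acc) acc)
  | [], _, _, h => h
  | row :: rest, d, acc, h => by
    simp only [List.foldl_cons]
    cases hp : pvParse? row with
    | none => exact pv_fold_inv rest d acc h
    | some step => exact pv_fold_inv rest _ _ (pv_step_inv d acc step row h)

-- ===== VERDICT (by name: the statement is the Claim_ definition above) =====
theorem deduplicate_by_step_spec : Claim_equal_deduplicate_by_step := by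
  intro rows _
  unfold Spec_deduplicate_by_step deduplicate_by_step deduplicate_by_step_alt
  have h0 : pvInv PySem.Dict.empty [] := by
    refine ⟨?_, List.Pairwise.nil, ?_⟩
    · simp [PySem.Dict.keys, PySem.Dict.empty]
    · simp [PySem.Dict.empty]
  obtain ⟨hnd, hpw, hperm⟩ := pv_fold_inv rows PySem.Dict.empty [] h0
  set d := rows.foldl (fun d row =>
    match pvParse? row with
    | none => d
    | some step => d.insert step row) PySem.Dict.empty with hd
  set acc := rows.foldl (fun acc row =>
    match pvParse? row with
    | none => acc
    | some step => pvInsSorted step row acc) [] with hacc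
  have hkeys : (acc.map Prod.fst).Perm d.keys := hperm.map _
  have hsorted : PySem.List.sorted d.keys (fun k => k) false = acc.map Prod.fst :=
    PySem.List.sorted_eq_of_perm_of_pairwise_lt d.keys (acc.map Prod.fst) (fun k => k)
      hkeys (by rw [List.pairwise_map]; exact hpw)
  simp only [hsorted, List.map_map]
  apply List.map_congr_left
  intro p hp
  show d.getD p.1 [] = p.2
  exact PySem.Dict.getD_of_mem_items d (by simpa using hperm.subset hp) hnd []
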